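-- pv_equiv track=rewrite | github.com/SeanNHarris/modular-coevolution | modularcoevolution/graphics/plothelper.py | get_key_overlap
-- ===== SOURCE A (Python) =====
-- def get_key_overlap(keys: list[str]) -> tuple[str, list[str]]:
--     key_matrix = [key.split('.') for key in keys]
--     overlap_count = 0
--     while True:
--         if any(len(key_parts) <= overlap_count for key_parts in key_matrix):
--             break
--         if len(set(key_parts[overlap_count] for key_parts in key_matrix)) == 1:
--             overlap_count += 1
--         else:
--             break
--     overlap = '.'.join(key_matrix[0][:overlap_count])
--     remainders = ['.'.join(key_parts[overlap_count:]) for key_parts in key_matrix]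
--     return overlap, remainders
-- ===== SOURCE B (Python) =====
-- def get_key_overlap(keys):
--     key_matrix = [key.split('.') for key in keys]
--     prefix = key_matrix[0]
--     for parts in key_matrix[1:]:
--         n = 0
--         while n < len(prefix) and n < len(parts) and prefix[n] == parts[n]:
--             n += 1
--         prefix = prefix[:n]
--     count = len(prefix)
--     overlap = '.'.join(prefix)
--     remainders = ['.'.join(parts[count:]) for parts in key_matrix]
--     return overlap, remainders
-- ===== Notes on version B (the rewrite author's own statement) =====
-- stated objective: alternative
-- what changed: A scans column-by-column, counting leading columns where the set of entries is a singleton; B instead folds row-by-row, shrinking a candidate prefix to its common prefix with each subsequent key, with no set construction and no column indexing.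
-- outside the precondition, e.g. on get_key_overlap([]): A raises IndexError, B raises IndexError
import Mathlib
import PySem

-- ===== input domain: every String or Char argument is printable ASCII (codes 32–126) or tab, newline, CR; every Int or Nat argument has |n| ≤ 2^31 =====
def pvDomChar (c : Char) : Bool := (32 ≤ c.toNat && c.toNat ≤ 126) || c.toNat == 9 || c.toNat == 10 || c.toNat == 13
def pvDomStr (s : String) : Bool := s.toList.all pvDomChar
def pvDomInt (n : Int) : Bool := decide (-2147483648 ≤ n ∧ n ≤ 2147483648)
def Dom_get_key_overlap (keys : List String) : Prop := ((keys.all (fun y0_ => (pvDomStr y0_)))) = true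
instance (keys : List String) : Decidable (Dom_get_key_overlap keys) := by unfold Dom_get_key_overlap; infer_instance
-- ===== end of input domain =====

-- B replaces A's column-by-column scan (singleton-set test per column) by a row-by-row
-- fold shrinking a candidate prefix to its common prefix with each key: alternative decomposition.

-- ===== PORT A =====
-- A's `while True` loop: overlap_count grows by 1 per iteration and the loop exits no
-- later than when overlap_count reaches len(key_matrix[0]), so fuel = len(km[0]) + 1
-- suffices; `kp.getD oc ""` only fires after the `any` guard ensured oc < len kp.
def aLoop (km : List (List String)) (fuel : Nat) (oc : Nat) : Nat :=
  match fuel with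
  | 0 => oc
  | Nat.succ f =>
      if km.any (fun kp => decide (kp.length ≤ oc)) then oc
      else if PySem.Set.len (PySem.Set.ofList (km.map (fun kp => kp.getD oc ""))) = 1 then
        aLoop km f (oc + 1)
      else oc

def get_key_overlap (keys : List String) : String × List String :=
  let km := keys.map (fun k => (PySem.Str.split? k ".").getD [])  -- sep "." ≠ "", so split? is always some
  let oc := aLoop km ((km.headD []).length + 1) 0
  -- km.headD []: Python's key_matrix[0] raises IndexError on [], excluded by Pre_
  (PySem.Str.join "." ((km.headD []).take oc),
   km.map (fun kp => PySem.Str.join "." (kp.drop oc)))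

-- ===== PORT B =====
-- Source B's inner while loop counting agreeing leading entries of two lists
def cplen : List String → List String → Nat
  | a :: as, b :: bs => if a = b then cplen as bs + 1 else 0
  | _, _ => 0

def get_key_overlap_alt (keys : List String) : String × List String :=
  let km := keys.map (fun k => (PySem.Str.split? k ".").getD [])  -- sep "." ≠ "", so split? is always some
  -- km.headD []: B's key_matrix[0] raises IndexError on [], excluded by Pre_
  let pref := km.tail.foldl (fun pr parts => pr.take (cplen pr parts)) (km.headD [])
  let count := pref.length
  (PySem.Str.join "." pref,
   km.map (fun parts => PySem.Str.join "." (parts.drop count)))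

-- ===== PRECONDITION & SPEC =====
-- Pre_ excludes only keys = [], where the Python A raises IndexError (key_matrix[0]); B raises there too.
def Pre_get_key_overlap (keys : List String) : Prop := keys ≠ []
instance (keys : List String) : Decidable (Pre_get_key_overlap keys) := by unfold Pre_get_key_overlap; infer_instance
def pvWitness_get_key_overlap : List String := ["a.b.c", "a.b.d"]

def Spec_get_key_overlap (keys : List String) (out : String × List String) : Prop := out = get_key_overlap_alt keys
instance (keys : List String) (out : String × List String) : Decidable (Spec_get_key_overlap keys out) := by unfold Spec_get_key_overlap; infer_instance

-- ===== CLAIM (what is proved, stated in full; the proofs are below) =====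
def Claim_equal_get_key_overlap : Prop := ∀ (keys : List String), Dom_get_key_overlap keys → Pre_get_key_overlap keys → Spec_get_key_overlap keys (get_key_overlap keys)

-- ===== LEMMAS AND PROOFS =====

-- the fold B performs, abstracted over the split matrix
def lcp (h : List String) (t : List (List String)) : List String :=
  t.foldl (fun pr parts => pr.take (cplen pr parts)) h

theorem cplen_le_left (a b : List String) : cplen a b ≤ a.length := by
  induction a generalizing b with
  | nil => simp [cplen]
  | cons x xs ih =>
    cases b with
    | nil => simp [cplen]
    | cons y ys =>
      simp only [cplen]
      split_ifs
      · simpa using ih ys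
      · simp

theorem take_cplen_prefix_right (a b : List String) : a.take (cplen a b) <+: b := by
  induction a generalizing b with
  | nil => simp [cplen]
  | cons x xs ih =>
    cases b with
    | nil => simp [cplen]
    | cons y ys =>
      simp only [cplen]
      split_ifs with hxy
      · subst hxy
        simpa [List.take, List.cons_prefix_cons] using ih ys
      · simp

theorem le_cplen_of_prefix (a b : List String) (n : Nat) (hn : n ≤ a.length)
    (hp : a.take n <+: b) : n ≤ cplen a b := by
  induction a generalizing b n with
  | nil =>
    have : n = 0 := by simpa using hn
    simp [this]
  | cons x xs ih =>
    cases n with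
    | zero => simp
    | succ m =>
      cases b with
      | nil =>
        exfalso
        have := hp.length_le
        simp at this
      | cons y ys =>
        simp only [List.take, List.cons_prefix_cons] at hp
        simp only [cplen, hp.1, if_true]
        have := ih ys m (by simpa using hn) hp.2
        omega

theorem lcp_prefix (h : List String) (t : List (List String)) :
    lcp h t <+: h ∧ ∀ r ∈ t, lcp h t <+: r := by
  induction t generalizing h with
  | nil => simp [lcp]
  | cons b t' ih =>
    have hfold : lcp h (b :: t') = lcp (h.take (cplen h b)) t' := rfl
    obtain ⟨ih1, ih2⟩ := ih (h.take (cplen h b))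
    rw [hfold]
    refine ⟨ih1.trans (List.take_prefix _ _), ?_⟩
    intro r hr
    rcases List.mem_cons.mp hr with rfl | hr
    · exact ih1.trans (take_cplen_prefix_right h r)
    · exact ih2 r hr

theorem lcp_max (h : List String) (t : List (List String)) (n : Nat) (hn : n ≤ h.length)
    (hall : ∀ r ∈ t, h.take n <+: r) : n ≤ (lcp h t).length := by
  induction t generalizing h with
  | nil => simpa [lcp] using hn
  | cons b t' ih =>
    have hnb : n ≤ cplen h b :=
      le_cplen_of_prefix h b n hn (hall b (List.mem_cons_self))
    have hcl : (h.take (cplen h b)).length = cplen h b := by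
      simp [cplen_le_left h b]
    have hfold : lcp h (b :: t') = lcp (h.take (cplen h b)) t' := rfl
    rw [hfold]
    apply ih (h.take (cplen h b)) (by omega)
    intro r hr
    have : (h.take (cplen h b)).take n = h.take n := by
      rw [List.take_take, Nat.min_eq_left hnb]
    rw [this]
    exact hall r (List.mem_cons_of_mem _ hr)

theorem foldl_add_singleton (x : String) (l : List String)
    (hall : ∀ y ∈ l, y = x) : List.foldl PySem.Set.add [x] l = [x] := by
  induction l with
  | nil => rfl
  | cons y l' ih =>
    have hy : y = x := hall y List.mem_cons_self
    subst hy
    simp only [List.foldl_cons]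
    have hadd : PySem.Set.add [y] y = [y] := by
      simp [PySem.Set.add, PySem.Set.contains]
    rw [hadd]
    exact ih (fun z hz => hall z (List.mem_cons_of_mem _ hz))

theorem setlen_one_of_all_eq (x : String) (l : List String)
    (hall : ∀ y ∈ l, y = x) : PySem.Set.len (PySem.Set.ofList (x :: l)) = 1 := by
  have h1 : PySem.Set.ofList (x :: l) = [x] := by
    show List.foldl PySem.Set.add (PySem.Set.add PySem.Set.empty x) l = [x]
    have : PySem.Set.add PySem.Set.empty x = [x] := by
      simp [PySem.Set.add, PySem.Set.contains, PySem.Set.empty]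
    rw [this]
    exact foldl_add_singleton x l hall
  rw [h1]
  rfl

theorem all_eq_of_setlen_one (x : String) (l : List String)
    (h : PySem.Set.len (PySem.Set.ofList (x :: l)) = 1) : ∀ y ∈ l, y = x := by
  intro y hy
  have hlen : (PySem.Set.ofList (x :: l)).length = 1 := by
    have : ((PySem.Set.ofList (x :: l)).length : Int) = 1 := h
    exact_mod_cast this
  obtain ⟨z, hz⟩ := List.length_eq_one_iff.mp hlen
  have hx : x ∈ PySem.Set.ofList (x :: l) :=
    (PySem.Set.mem_ofList _ _).mpr List.mem_cons_self
  have hym : y ∈ PySem.Set.ofList (x :: l) :=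
    (PySem.Set.mem_ofList _ _).mpr (List.mem_cons_of_mem _ hy)
  rw [hz] at hx hym
  simp only [List.mem_singleton] at hx hym
  rw [hym, hx]

-- prefix members agree with h on their common columns
theorem getD_eq_of_prefix (p r : List String) (hp : p <+: r) (i : Nat) (hi : i < p.length) :
    r.getD i "" = p.getD i "" := by
  have hir : i < r.length := lt_of_lt_of_le hi hp.length_le
  rw [List.getD_eq_getElem _ _ hir, List.getD_eq_getElem _ _ hi]
  exact (hp.getElem hi).symm

theorem prefix_extend (h r : List String) (oc : Nat) (hpref : h.take oc <+: r)
    (hoh : oc < h.length) (hor : oc < r.length)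
    (heq : r.getD oc "" = h.getD oc "") : h.take (oc + 1) <+: r := by
  rw [List.prefix_iff_getElem?] at hpref ⊢
  intro i hlen
  have hlen' : i < (h.take (oc+1)).length := hlen
  rw [List.length_take] at hlen'
  have hio : i < oc + 1 := lt_of_lt_of_le hlen' (Nat.min_le_left _ _)
  by_cases hi : i < oc
  · have := hpref i (by rw [List.length_take]; omega)
    simpa [List.getElem_take] using this
  · have hieq : i = oc := by omega
    subst hieq
    rw [List.getElem_take]
    rw [List.getD_eq_getElem _ _ hor, List.getD_eq_getElem _ _ hoh] at heq
    simp [heq, hor]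

theorem aLoop_eq_lcp (h : List String) (t : List (List String)) (fuel oc : Nat)
    (hle : oc ≤ (lcp h t).length) (hfuel : (lcp h t).length ≤ oc + fuel) :
    aLoop (h :: t) fuel oc = (lcp h t).length := by
  obtain ⟨hh, ht⟩ := lcp_prefix h t
  induction fuel generalizing oc with
  | zero => simp only [aLoop]; omega
  | succ f ih =>
    by_cases hstop : oc = (lcp h t).length
    · subst hstop
      -- the loop breaks now
      simp only [aLoop]
      split_ifs with hany hset
      · rfl
      · exfalso
        -- all rows are longer than oc and all column-oc entries equal: contradicts maximality
        simp only [List.any_eq_true, decide_eq_true_eq, not_exists, not_and] at hany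
        push Not at hany
        have hcols := all_eq_of_setlen_one _ _ (by simpa using hset)
        have hext : ∀ r ∈ t, h.take ((lcp h t).length + 1) <+: r := by
          intro r hr
          apply prefix_extend h r _ ?_ ?_ ?_ ?_
          · have htk : List.take (lcp h t).length h = lcp h t :=
              (List.prefix_iff_eq_take.mp hh).symm
            rw [htk]
            exact ht r hr
          · exact hany h List.mem_cons_self
          · exact hany r (List.mem_cons_of_mem _ hr)
          · simpa using hcols (r.getD (lcp h t).length "") (by
              simpa using List.mem_map.mpr ⟨r, hr, rfl⟩)
        have hlen1 : (lcp h t).length + 1 ≤ h.length :=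
          hany h List.mem_cons_self
        have := lcp_max h t ((lcp h t).length + 1) hlen1 hext
        omega
      · rfl
    · -- oc < length: the loop continues
      have hoc : oc < (lcp h t).length := lt_of_le_of_ne hle hstop
      simp only [aLoop]
      have hanyF : (h :: t).any (fun kp => decide (kp.length ≤ oc)) = false := by
        simp only [List.any_eq_false, decide_eq_true_eq, not_le]
        intro kp hkp
        rcases List.mem_cons.mp hkp with rfl | hkp
        · exact lt_of_lt_of_le hoc hh.length_le
        · exact lt_of_lt_of_le hoc (ht kp hkp).length_le
      rw [hanyF]
      simp only [Bool.false_eq_true, if_false]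
      have hcol : ∀ kp ∈ (h :: t), kp.getD oc "" = (lcp h t).getD oc "" := by
        intro kp hkp
        rcases List.mem_cons.mp hkp with rfl | hkp
        · exact getD_eq_of_prefix _ _ hh oc hoc
        · exact getD_eq_of_prefix _ _ (ht kp hkp) oc hoc
      have hset : PySem.Set.len (PySem.Set.ofList ((h :: t).map (fun kp => kp.getD oc ""))) = 1 := by
        simp only [List.map_cons]
        rw [hcol h List.mem_cons_self]
        apply setlen_one_of_all_eq
        intro y hy
        obtain ⟨r, hr, rfl⟩ := List.mem_map.mp hy
        exact hcol r (List.mem_cons_of_mem _ hr)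
      rw [hset]
      simp only [if_true]
      exact ih (oc + 1) hoc (by omega)

-- ===== VERDICT (by name: the statement is the Claim_ definition above) =====
theorem get_key_overlap_spec : Claim_equal_get_key_overlap := by
  intro keys _ hpre
  unfold Spec_get_key_overlap get_key_overlap get_key_overlap_alt
  cases keys with
  | nil => exact absurd rfl hpre
  | cons k ks =>
    simp only [List.map_cons, List.headD_cons, List.tail_cons]
    set h := (PySem.Str.split? k ".").getD [] with hh
    set t := ks.map (fun k => (PySem.Str.split? k ".").getD []) with ht
    have hfold : t.foldl (fun pr parts => pr.take (cplen pr parts)) h = lcp h t := rfl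
    rw [hfold]
    have hoc : aLoop (h :: t) (h.length + 1) 0 = (lcp h t).length := by
      apply aLoop_eq_lcp h t (h.length + 1) 0 (Nat.zero_le _)
      have := (lcp_prefix h t).1.length_le
      omega
    rw [hoc]
    have htake : h.take (lcp h t).length = lcp h t :=
      (List.prefix_iff_eq_take.mp (lcp_prefix h t).1).symm
    rw [htake]
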